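-- pv_equiv track=rewrite | github.com/paoloearth/acat | acat/acat.py | canbeextended
-- ===== SOURCE A (Python) =====
-- def canbeextended(values, wordstocheck, alphabet):
--     """Function that serves to build the extensibility
--        table"""
--     r=[0] * len(values)
--     for index, valore in enumerate(values):
--         for simbolo in alphabet:
--             if valore+simbolo in wordstocheck:
--                 r[index]+=1
--         if r[index]>1:
--             r[index]='+'
--         elif r[index]==0:
--             r[index]='o'
--         else:
--             r[index]='-'
--     return r
-- ===== SOURCE B (Python) =====
-- def canbeextended(values, wordstocheck, alphabet):
--     """Function that serves to build the extensibility
--        table"""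
--     counts = {}
--     for w in dict.fromkeys(wordstocheck):
--         for s in alphabet:
--             if w.endswith(s):
--                 p = w[:len(w) - len(s)]
--                 counts[p] = counts.get(p, 0) + 1
--     out = []
--     for v in values:
--         c = counts.get(v, 0)
--         out.append('+' if c > 1 else ('o' if c == 0 else '-'))
--     return out
-- ===== Notes on version B (the rewrite author's own statement) =====
-- stated objective: faster
-- what changed: Instead of scanning wordstocheck for every (value, symbol) pair, B builds one reverse index: for each distinct word and each symbol it ends with, it increments a count for the word's prefix, then classifies each value by a single dict lookup.
import Mathlib
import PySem

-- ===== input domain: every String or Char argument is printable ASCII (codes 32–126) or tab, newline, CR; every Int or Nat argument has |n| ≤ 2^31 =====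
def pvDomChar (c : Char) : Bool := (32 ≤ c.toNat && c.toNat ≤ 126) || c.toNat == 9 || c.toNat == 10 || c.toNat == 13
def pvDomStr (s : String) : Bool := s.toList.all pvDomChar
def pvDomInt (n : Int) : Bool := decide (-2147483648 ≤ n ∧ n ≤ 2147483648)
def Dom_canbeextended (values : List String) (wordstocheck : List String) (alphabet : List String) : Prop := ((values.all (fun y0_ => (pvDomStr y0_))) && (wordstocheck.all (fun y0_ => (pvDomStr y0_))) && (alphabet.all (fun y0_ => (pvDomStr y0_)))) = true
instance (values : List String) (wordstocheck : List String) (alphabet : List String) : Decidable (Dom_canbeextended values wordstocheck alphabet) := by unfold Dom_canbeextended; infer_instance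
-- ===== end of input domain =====

-- B replaces A's per-value scan of wordstocheck by a reverse index built once (counts per prefix), then one lookup per value; equivalence of the return value is proved below.

-- ===== PORT A =====
-- for each value, count symbols s with value+s in wordstocheck, then classify; r[index] updates become a map
def canbeextended (values : List String) (wordstocheck : List String) (alphabet : List String) : List String :=
  values.map (fun valore =>
    let c : Int := alphabet.foldl (fun c simbolo =>
      if (valore ++ simbolo) ∈ wordstocheck then c + 1 else c) 0
    if c > 1 then "+" else if c == 0 then "o" else "-")

-- ===== PORT B =====
-- w[:len(w) - len(s)]
def pvPrefix (w s : String) : String :=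
  String.ofList (PySem.Chars.slice w.toList none (some ((w.toList.length : Int) - (s.toList.length : Int))))

def canbeextended_alt (values : List String) (wordstocheck : List String) (alphabet : List String) : List String :=
  let counts : PySem.Dict String Int :=
    (PySem.List.dedup wordstocheck).foldl (fun d w =>
      alphabet.foldl (fun d s =>
        if PySem.Str.endswith w s then d.modify (pvPrefix w s) 0 (· + 1) else d) d)
      PySem.Dict.empty
  values.map (fun v =>
    let c := counts.getD v 0
    if c > 1 then "+" else if c == 0 then "o" else "-")

-- ===== PRECONDITION & SPEC =====
def Spec_canbeextended (values : List String) (wordstocheck : List String) (alphabet : List String) (out : List String) : Prop := out = canbeextended_alt values wordstocheck alphabet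
instance (values : List String) (wordstocheck : List String) (alphabet : List String) (out : List String) : Decidable (Spec_canbeextended values wordstocheck alphabet out) := by unfold Spec_canbeextended; infer_instance

-- ===== CLAIM (what is proved, stated in full; the proofs are below) =====
def Claim_equal_canbeextended : Prop := ∀ (values : List String) (wordstocheck : List String) (alphabet : List String), Dom_canbeextended values wordstocheck alphabet → Spec_canbeextended values wordstocheck alphabet (canbeextended values wordstocheck alphabet)

-- ===== LEMMAS AND PROOFS =====

-- w ends with s and its prefix (of length len w - len s) is v  ⟺  w = v ++ s
theorem pvPrefix_char (w s v : String) :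
    (PySem.Str.endswith w s = true ∧ pvPrefix w s = v) ↔ w = v ++ s := by
  rw [PySem.Str.endswith_eq, PySem.Chars.endswith_iff, pvPrefix]
  simp only [PySem.Chars.slice_eq_listSlice]
  constructor
  · rintro ⟨⟨t, ht⟩, hp⟩
    have hlen : s.toList.length ≤ w.toList.length := by
      rw [← ht]; simp
    have hb : (w.toList.length : Int) - (s.toList.length : Int)
        = ((w.toList.length - s.toList.length : Nat) : Int) := by omega
    rw [hb, PySem.List.slice_to_natCast] at hp
    have htake : w.toList.take (w.toList.length - s.toList.length) = t := by
      rw [← ht]; simp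
    rw [htake] at hp
    have ht' : t = v.toList := by
      subst hp; simp
    apply String.ext
    rw [← ht, ht']; simp
  · intro h
    subst h
    refine ⟨⟨v.toList, by simp⟩, ?_⟩
    have hb : (((v ++ s).toList.length : Int) - (s.toList.length : Int))
        = ((v.toList.length : Nat) : Int) := by simp
    rw [hb, PySem.List.slice_to_natCast]
    apply String.ext
    simp

theorem pvInner_getD (alphabet : List String) (w v : String) (d : PySem.Dict String Int) :
    (alphabet.foldl (fun d s =>
        if PySem.Str.endswith w s then d.modify (pvPrefix w s) 0 (· + 1) else d) d).getD v 0
    = d.getD v 0 + (alphabet.countP (fun s => w == v ++ s) : Int) := by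
  induction alphabet generalizing d with
  | nil => simp
  | cons s as ih =>
    rw [List.foldl_cons, List.countP_cons]
    by_cases he : PySem.Str.endswith w s = true
    · rw [if_pos he, ih, PySem.Dict.getD_modify]
      by_cases hv : v = pvPrefix w s
      · have hw : w = v ++ s := (pvPrefix_char w s v).mp ⟨he, hv.symm⟩
        have hb : (w == v ++ s) = true := by simp [hw]
        rw [if_pos hv, ← hv]
        simp [hb]
        ring
      · have hw : ¬ (w == v ++ s) = true := by
          intro hb
          exact hv (((pvPrefix_char w s v).mpr (by exact eq_of_beq hb)).2.symm)
        simp [if_neg hv, hw]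
    · have hw : ¬ (w == v ++ s) = true := by
        intro hb
        exact he ((pvPrefix_char w s v).mpr (eq_of_beq hb)).1
      rw [if_neg he, ih]
      simp [hw]

theorem pvOuter_getD (ws alphabet : List String) (v : String) (d : PySem.Dict String Int) :
    (ws.foldl (fun d w => alphabet.foldl (fun d s =>
        if PySem.Str.endswith w s then d.modify (pvPrefix w s) 0 (· + 1) else d) d) d).getD v 0
    = d.getD v 0 + (ws.map (fun w => (alphabet.countP (fun s => w == v ++ s) : Int))).sum := by
  induction ws generalizing d with
  | nil => simp
  | cons w rest ih =>
    rw [List.foldl_cons, ih, pvInner_getD, List.map_cons, List.sum_cons]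
    ring

theorem pvExchange (ws alphabet : List String) (v : String) (h : ws.Nodup) :
    (ws.map (fun w => (alphabet.countP (fun s => w == v ++ s) : Int))).sum
    = (alphabet.countP (fun s => decide ((v ++ s) ∈ ws)) : Int) := by
  induction alphabet with
  | nil => simp
  | cons s as ih =>
    simp only [List.countP_cons]
    have hcast : (ws.map (fun w => ((as.countP (fun s' => w == v ++ s') + if (w == v ++ s) = true then 1 else 0 : Nat) : Int))).sum
        = (ws.map (fun w => ((as.countP (fun s' => w == v ++ s') : Int) + (if (w == v ++ s) = true then 1 else 0 : Int)))).sum := by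
      congr 1
      apply List.map_congr_left
      intro w _
      split <;> push_cast <;> ring
    rw [hcast, PySem.List.sum_map_add_int, ih, PySem.List.sum_map_ite_one_zero]
    have h2 : ws.countP (fun w => w == v ++ s) = ws.count (v ++ s) := rfl
    have h3 : ws.count (v ++ s) = if (v ++ s) ∈ ws then 1 else 0 := by
      by_cases hm : (v ++ s) ∈ ws
      · have hle : ws.count (v ++ s) ≤ 1 := List.nodup_iff_count_le_one.mp h _
        have hpos : 0 < ws.count (v ++ s) := List.count_pos_iff.mpr hm
        simp [hm]; omega
      · simp [hm, List.count_eq_zero_of_not_mem hm]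
    rw [h2, h3]
    by_cases hm : (v ++ s) ∈ ws <;> simp [hm]

theorem pvCountA (alphabet wordstocheck : List String) (v : String) :
    (alphabet.foldl (fun c simbolo =>
        if (v ++ simbolo) ∈ wordstocheck then c + 1 else c) (0 : Int))
    = (alphabet.countP (fun s => decide ((v ++ s) ∈ PySem.List.dedup wordstocheck)) : Int) := by
  have := PySem.List.foldl_ite_add_one (fun s => (v ++ s) ∈ wordstocheck) alphabet 0
  rw [this, zero_add]
  congr 1
  apply List.countP_congr
  intro s _
  simp

-- ===== VERDICT (by name: the statement is the Claim_ definition above) =====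
theorem canbeextended_spec : Claim_equal_canbeextended := by
  intro values wordstocheck alphabet _
  unfold Spec_canbeextended canbeextended canbeextended_alt
  apply List.map_congr_left
  intro v _
  have hB : ((PySem.List.dedup wordstocheck).foldl (fun d w =>
        alphabet.foldl (fun d s =>
          if PySem.Str.endswith w s then d.modify (pvPrefix w s) 0 (· + 1) else d) d)
        PySem.Dict.empty).getD v 0
      = (alphabet.countP (fun s => decide ((v ++ s) ∈ PySem.List.dedup wordstocheck)) : Int) := by
    rw [pvOuter_getD, pvExchange _ _ _ (PySem.List.nodup_dedup wordstocheck)]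
    rw [show (PySem.Dict.empty : PySem.Dict String Int).getD v 0 = 0 from rfl, zero_add]
  rw [pvCountA, hB]
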